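-- pv_equiv track=rewrite | github.com/gdj0208/Programmers_ANS | PS/Level_1/바탕화면_정리.py | solution
-- ===== SOURCE A (Python) =====
-- def solution(wallpaper):
--     answer = []
--
--     height = len(wallpaper)
--     width = len(wallpaper[0])
--
--     min_x, max_x = width, 0
--     min_y, max_y = height, 0
--
--
--     for y in range(height):
--         for x in range(width) :
--             if wallpaper[y][x] == '.' :
--                 continue
--
--             min_x = x if x < min_x else min_x
--             min_y = y if y < min_y else min_y
--             max_x = x if max_x < x else max_x
--             max_y = y if max_y < y else max_y
--
--     answer =[min_y, min_x, max_y+1, max_x+1]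
--     return answer
-- ===== SOURCE B (Python) =====
-- def solution(wallpaper):
--     width = len(wallpaper[0])
--     pts = [(y, x) for y, row in enumerate(wallpaper)
--                   for x, c in enumerate(row[:width]) if c != '.']
--     ys = [y for y, _ in pts]
--     xs = [x for _, x in pts]
--     return [min(ys), min(xs), max(ys) + 1, max(xs) + 1]
-- ===== Notes on version B (the rewrite author's own statement) =====
-- stated objective: simpler
-- what changed: Replaces the nested index loops with four running min/max accumulators by one comprehension collecting the coordinates of all non-'.' cells followed by builtin min/max reductions.
-- outside the precondition, e.g. on solution(['..', '..']): A returns [2, 2, 1, 1], B raises ValueError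
import Mathlib
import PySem

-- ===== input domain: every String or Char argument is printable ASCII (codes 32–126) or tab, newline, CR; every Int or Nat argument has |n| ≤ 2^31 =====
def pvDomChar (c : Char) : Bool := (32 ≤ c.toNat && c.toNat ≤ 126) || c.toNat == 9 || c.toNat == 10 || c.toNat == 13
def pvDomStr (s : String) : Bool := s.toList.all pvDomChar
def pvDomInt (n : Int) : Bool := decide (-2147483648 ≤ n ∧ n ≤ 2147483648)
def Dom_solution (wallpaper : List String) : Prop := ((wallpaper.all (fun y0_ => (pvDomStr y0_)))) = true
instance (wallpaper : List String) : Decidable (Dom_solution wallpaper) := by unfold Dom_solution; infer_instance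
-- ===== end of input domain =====

-- B replaces A's nested index loops carrying four running min/max variables by one comprehension
-- collecting the coordinates of every non-'.' cell followed by builtin min/max reductions (objective: simpler).

-- ===== PORT A =====
def solution (wallpaper : List String) : List Int :=
  match PySem.List.pyGet? wallpaper 0 with
  | none => []   -- wallpaper[0] raises IndexError on the empty list; excluded by Pre_solution
  | some row0 =>
      let height : Int := PySem.List.len wallpaper
      let width : Int := PySem.Str.len row0
      let s :=
        (PySem.List.pyRange 0 height).foldl (fun s y =>
          (PySem.List.pyRange 0 width).foldl (fun s x =>
            match PySem.Str.pyGet? (PySem.List.pyGetD wallpaper y "") x with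
            | none => s   -- wallpaper[y][x] raises IndexError on a too-short row; excluded by Pre_solution
            | some c =>
              if c = '.' then s
              else ((if x < s.1 then x else s.1),
                    (if y < s.2.1 then y else s.2.1),
                    (if s.2.2.1 < x then x else s.2.2.1),
                    (if s.2.2.2 < y then y else s.2.2.2))) s) (width, height, 0, 0)
      [s.2.1, s.1, s.2.2.2 + 1, s.2.2.1 + 1]

-- ===== PORT B =====
def solution_alt (wallpaper : List String) : List Int :=
  match PySem.List.pyGet? wallpaper 0 with
  | none => []   -- wallpaper[0] raises IndexError on the empty list; excluded by Pre_solution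
  | some row0 =>
      let width : Int := PySem.Str.len row0
      let pts : List (Int × Int) :=
        (PySem.List.enumerate wallpaper).flatMap (fun yr =>
          (PySem.List.enumerate (PySem.Str.slice yr.2 none (some width)).toList).filterMap
            (fun xc => if xc.2 ≠ '.' then some (yr.1, xc.1) else none))
      let ys := pts.map (·.1)
      let xs := pts.map (·.2)
      match PySem.List.min? ys (fun v => v), PySem.List.min? xs (fun v => v),
            PySem.List.max? ys (fun v => v), PySem.List.max? xs (fun v => v) with
      | some mny, some mnx, some mxy, some mxx => [mny, mnx, mxy + 1, mxx + 1]
      | _, _, _, _ => []   -- min()/max() of the empty sequence raises ValueError; excluded by Pre_solution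

-- ===== PRECONDITION & SPEC =====
-- Pre_solution excludes: (a) inputs where A raises (the empty list: wallpaper[0] IndexError; a row shorter
-- than the first row: IndexError in the inner loop), and (b) grids whose scanned region contains no
-- non-'.' cell, where A returns the leftover sentinel state [height, width, 1, 1] while B's min()/max()
-- of an empty sequence raises ValueError.
def Pre_solution (wallpaper : List String) : Prop :=
  wallpaper ≠ [] ∧
  (∀ row ∈ wallpaper, (wallpaper.headD "").toList.length ≤ row.toList.length) ∧
  ((wallpaper.any fun row =>
      (row.toList.take (wallpaper.headD "").toList.length).any (fun c => c != '.')) = true)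
instance (wallpaper : List String) : Decidable (Pre_solution wallpaper) := by
  unfold Pre_solution; infer_instance

def pvWitness_solution : List String := ["#.", ".#"]

def Spec_solution (wallpaper : List String) (out : List Int) : Prop := out = solution_alt wallpaper
instance (wallpaper : List String) (out : List Int) : Decidable (Spec_solution wallpaper out) := by unfold Spec_solution; infer_instance

-- ===== CLAIM (what is proved, stated in full; the proofs are below) =====
def Claim_equal_solution : Prop := ∀ (wallpaper : List String), Dom_solution wallpaper → Pre_solution wallpaper → Spec_solution wallpaper (solution wallpaper)

-- ===== LEMMAS AND PROOFS =====

-- the pure min/max update one non-'.' cell (y, x) performs on the state (min_x, min_y, max_x, max_y)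
def pvUpd (s : Int × Int × Int × Int) (e : Int × Int) : Int × Int × Int × Int :=
  (min s.1 e.2, min s.2.1 e.1, max s.2.2.1 e.2, max s.2.2.2 e.1)

-- the coordinates of the non-'.' cells among the first w columns, in scan order
def pvPts (wallpaper : List String) (w : Nat) : List (Int × Int) :=
  (PySem.List.enumerate wallpaper).flatMap (fun yr =>
    (PySem.List.enumerate (yr.2.toList.take w)).filterMap
      (fun xc => if xc.2 ≠ '.' then some (yr.1, xc.1) else none))

-- folding over a filterMap is folding with a skip
lemma foldl_filterMap_match {α β γ : Type} (l : List α) (g : α → Option β) (u : γ → β → γ) (s : γ) :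
    (l.filterMap g).foldl u s = l.foldl (fun s a => match g a with | some b => u s b | none => s) s := by
  induction l generalizing s with
  | nil => rfl
  | cons x t ih => cases hg : g x <;> simp [hg, ih]

-- A's inner loop over one row equals the pure fold over that row's selected coordinates
lemma inner_loop_eq (row : String) (y : Int) (w : Nat) (hw : w ≤ row.toList.length)
    (s : Int × Int × Int × Int) :
    (PySem.List.pyRange 0 (w : Int)).foldl (fun s x =>
      match PySem.Str.pyGet? row x with
      | none => s
      | some c =>
        if c = '.' then s
        else ((if x < s.1 then x else s.1),
              (if y < s.2.1 then y else s.2.1),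
              (if s.2.2.1 < x then x else s.2.2.1),
              (if s.2.2.2 < y then y else s.2.2.2))) s
    = ((PySem.List.enumerate (row.toList.take w)).filterMap
        (fun xc => if xc.2 ≠ '.' then some (y, xc.1) else none)).foldl pvUpd s := by
  rw [foldl_filterMap_match]
  have hlen : PySem.List.len (row.toList.take w) = (w : Int) := by
    rw [PySem.List.len_eq, List.length_take]
    omega
  rw [PySem.List.enumerate_eq_map_pyRange (row.toList.take w) '.', hlen, List.foldl_map]
  apply PySem.List.foldl_congr_mem
  intro acc x hx
  rw [PySem.List.mem_pyRange_one] at hx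
  have hxw : x.toNat < w := by omega
  have hxl : x.toNat < row.toList.length := by omega
  have h1 : PySem.Str.pyGet? row x = some (row.toList[x.toNat]) := by
    simp [PySem.Str.pyGet?, PySem.List.pyGet?_of_nonneg _ hx.1, List.getElem?_eq_getElem hxl]
  have h2 : PySem.List.pyGetD (row.toList.take w) x '.' = row.toList[x.toNat] := by
    rw [PySem.List.pyGetD_eq_getElem _ _ hx.1 (by rw [List.length_take]; omega)]
    simp [List.getElem_take]
  rw [h1, h2]
  by_cases hc : row.toList[x.toNat] = '.'
  · simp [hc]
  · simp only [hc, ne_eq, not_false_iff, if_pos]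
    obtain ⟨a, b, c', d⟩ := acc
    simp [pvUpd]
    refine ⟨?_, ?_, ?_, ?_⟩ <;> split_ifs <;> omega

-- every collected coordinate lies inside the grid bounds
lemma pts_bounds (wallpaper : List String) (w : Nat) (p : Int × Int) (hp : p ∈ pvPts wallpaper w) :
    0 ≤ p.1 ∧ p.1 < (wallpaper.length : Int) ∧ 0 ≤ p.2 ∧ p.2 < (w : Int) := by
  simp only [pvPts, List.mem_flatMap] at hp
  obtain ⟨yr, hyr, hp2⟩ := hp
  rw [PySem.List.mem_enumerate_iff] at hyr
  obtain ⟨k, hk, rfl⟩ := hyr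
  rw [List.mem_filterMap] at hp2
  obtain ⟨xc, hxc, hsel⟩ := hp2
  rw [PySem.List.mem_enumerate_iff] at hxc
  obtain ⟨j, hj, rfl⟩ := hxc
  rw [List.length_take] at hj
  split_ifs at hsel
  cases hsel
  exact ⟨by simp, by simp; omega, by simp, by simp; omega⟩

-- the Pre_ existential makes the collected list nonempty
lemma pts_ne_nil (wallpaper : List String) (w : Nat)
    (hex : ∃ row ∈ wallpaper, ∃ c ∈ row.toList.take w, c ≠ '.') :
    pvPts wallpaper w ≠ [] := by
  obtain ⟨row, hrow, c, hc, hcne⟩ := hex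
  obtain ⟨k, hk, rfl⟩ := List.mem_iff_getElem.mp hrow
  obtain ⟨j, hj, rfl⟩ := List.mem_iff_getElem.mp hc
  intro hnil
  have : ((k : Int), (j : Int)) ∈ pvPts wallpaper w := by
    simp only [pvPts, List.mem_flatMap]
    refine ⟨((k : Int), wallpaper[k]), ?_, ?_⟩
    · rw [PySem.List.mem_enumerate_iff]
      exact ⟨k, hk, by simp⟩
    · rw [List.mem_filterMap]
      refine ⟨((j : Int), (wallpaper[k].toList.take w)[j]), ?_, ?_⟩
      · rw [PySem.List.mem_enumerate_iff]
        exact ⟨j, hj, by simp⟩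
      · simp only [List.getElem_take] at hcne
        simp [hcne]
  rw [hnil] at this
  exact absurd this (List.not_mem_nil)

-- ===== VERDICT (by name: the statement is the Claim_ definition above) =====
set_option maxHeartbeats 1000000 in
theorem solution_spec : Claim_equal_solution := by
  intro wallpaper _hdom hpre
  obtain ⟨hne, hrows, hex⟩ := hpre
  unfold Spec_solution
  cases wallpaper with
  | nil => exact absurd rfl hne
  | cons r0 rest =>
  simp only [List.headD_cons] at hrows hex
  rw [List.any_eq_true] at hex
  simp only [List.any_eq_true, bne_iff_ne, ne_eq] at hex
  obtain ⟨p0, P', hP⟩ : ∃ p0 P', pvPts (r0 :: rest) r0.toList.length = p0 :: P' := by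
    rcases h : pvPts (r0 :: rest) r0.toList.length with _ | ⟨p0, P'⟩
    · exact absurd h (pts_ne_nil _ _ hex)
    · exact ⟨p0, P', rfl⟩
  obtain ⟨hy0, hy1, hx0, hx1⟩ := pts_bounds _ _ p0 (by rw [hP]; exact List.mem_cons_self)
  -- B's slice of a row is a take
  have hsl : ∀ row : String,
      (PySem.Str.slice row none (some (PySem.Str.len r0))).toList = row.toList.take r0.toList.length := by
    intro row
    rw [PySem.Str.toList_slice, PySem.Str.len_eq]
    show PySem.List.slice _ _ _ = _
    rw [PySem.List.slice_to _ (by positivity)]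
    simp
  -- B computes the four builtin reductions over pvPts
  have hB : solution_alt (r0 :: rest) =
      [(P'.map (·.1)).foldl min p0.1, (P'.map (·.2)).foldl min p0.2,
       (P'.map (·.1)).foldl max p0.1 + 1, (P'.map (·.2)).foldl max p0.2 + 1] := by
    simp only [solution_alt, PySem.List.pyGet?_zero_cons, hsl]
    rw [show ((PySem.List.enumerate (r0 :: rest)).flatMap (fun yr =>
          (PySem.List.enumerate (yr.2.toList.take r0.toList.length)).filterMap
            (fun xc => if xc.2 ≠ '.' then some (yr.1, xc.1) else none)))
        = pvPts (r0 :: rest) r0.toList.length from rfl, hP]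
    simp only [List.map_cons, PySem.List.min?_id_cons, PySem.List.max?_id_cons]
  -- A's nested loops compute the pure fold over pvPts, which splits into the same four reductions
  have hA : solution (r0 :: rest) =
      [(P'.map (·.1)).foldl min p0.1, (P'.map (·.2)).foldl min p0.2,
       (P'.map (·.1)).foldl max p0.1 + 1, (P'.map (·.2)).foldl max p0.2 + 1] := by
    simp only [solution, PySem.List.pyGet?_zero_cons]
    have h1 : (PySem.List.pyRange 0 (PySem.List.len (r0 :: rest))).foldl (fun s y =>
          (PySem.List.pyRange 0 (PySem.Str.len r0)).foldl (fun s x =>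
            match PySem.Str.pyGet? (PySem.List.pyGetD (r0 :: rest) y "") x with
            | none => s
            | some c =>
              if c = '.' then s
              else ((if x < s.1 then x else s.1),
                    (if y < s.2.1 then y else s.2.1),
                    (if s.2.2.1 < x then x else s.2.2.1),
                    (if s.2.2.2 < y then y else s.2.2.2))) s)
          (PySem.Str.len r0, PySem.List.len (r0 :: rest), 0, 0)
        = (pvPts (r0 :: rest) r0.toList.length).foldl pvUpd
            (PySem.Str.len r0, PySem.List.len (r0 :: rest), 0, 0) := by
      rw [pvPts, List.foldl_flatMap]
      rw [PySem.List.enumerate_eq_map_pyRange (r0 :: rest) "", List.foldl_map]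
      apply PySem.List.foldl_congr_mem
      intro acc y hy
      have h0len : PySem.List.len (r0 :: rest) = ((r0 :: rest).length : Int) := PySem.List.len_eq _
      rw [h0len, PySem.List.mem_pyRange_one] at hy
      have hyn : y.toNat < (r0 :: rest).length := by omega
      have hle : r0.toList.length ≤ (PySem.List.pyGetD (r0 :: rest) y "").toList.length := by
        rw [PySem.List.pyGetD_eq_getElem _ _ hy.1 (by omega)]
        exact hrows _ (List.getElem_mem hyn)
      have := inner_loop_eq (PySem.List.pyGetD (r0 :: rest) y "") y r0.toList.length hle acc
      rw [PySem.Str.len_eq]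
      exact this
    rw [h1, hP]
    rw [show pvUpd = (fun (s : Int × Int × Int × Int) (e : Int × Int) =>
          (min s.1 e.2, min s.2.1 e.1, max s.2.2.1 e.2, max s.2.2.2 e.1)) from rfl]
    rw [PySem.List.foldl_prod_mk (f := fun (a : Int) (e : Int × Int) => min a e.2)
          (g := fun (t : Int × Int × Int) (e : Int × Int) => (min t.1 e.1, max t.2.1 e.2, max t.2.2 e.1))]
    rw [PySem.List.foldl_prod_mk (f := fun (a : Int) (e : Int × Int) => min a e.1)
          (g := fun (t : Int × Int) (e : Int × Int) => (max t.1 e.2, max t.2 e.1))]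
    rw [PySem.List.foldl_prod_mk (f := fun (a : Int) (e : Int × Int) => max a e.2)
          (g := fun (a : Int) (e : Int × Int) => max a e.1)]
    simp only [List.foldl_cons, PySem.Str.len_eq, PySem.List.len_eq]
    rw [min_eq_right (le_of_lt hx1), min_eq_right (le_of_lt hy1),
        max_eq_right hx0, max_eq_right hy0]
    simp [List.foldl_map]
  rw [hA, hB]
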